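-- pv_equiv track=rewrite | github.com/ibnaleem/luhn-algorithm | src/luhn-algorithm.py | _double_other
-- ===== SOURCE A (Python) =====
-- def _double_other(card_number) -> list:
--     """Double every other digit starting from the second-to-last digit."""
--     card_array = [int(char) for char in str(card_number)]
--     doubled_array = []
--
--     for i in range(len(card_array) - 2, -1, -2):
--         doubled_digit = card_array[i] * 2
--         if doubled_digit > 9:
--             doubled_digit -= 9
--         doubled_array.append(doubled_digit)
--         doubled_array.append(card_array[i + 1] if i + 1 < len(card_array) else 0)
--
--     if len(card_array) % 2 != 0:
--         doubled_array.append(card_array[0])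
--
--     return doubled_array
-- ===== SOURCE B (Python) =====
-- def _double_other(card_number) -> list:
--     """Double every other digit starting from the second-to-last digit."""
--     digits = [int(char) for char in str(card_number)]
--
--     def go(rev):
--         # consume the reversed digits two at a time, building the output back-to-front pair by pair
--         if len(rev) < 2:
--             return list(rev)
--         first, second, *rest = rev
--         doubled = second * 2
--         if doubled > 9:
--             doubled -= 9
--         return [doubled, first] + go(rest)
--
--     return go(digits[::-1])
-- ===== Notes on version B (the rewrite author's own statement) =====
-- stated objective: alternative
-- what changed: A's backward index-stepping loop (range(len-2,-1,-2) with indexed lookups and appends) is replaced by reversing the digit list once and recursing on its structure two elements at a time, building each [doubled, kept] pair directly with no index arithmetic.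
import Mathlib
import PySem

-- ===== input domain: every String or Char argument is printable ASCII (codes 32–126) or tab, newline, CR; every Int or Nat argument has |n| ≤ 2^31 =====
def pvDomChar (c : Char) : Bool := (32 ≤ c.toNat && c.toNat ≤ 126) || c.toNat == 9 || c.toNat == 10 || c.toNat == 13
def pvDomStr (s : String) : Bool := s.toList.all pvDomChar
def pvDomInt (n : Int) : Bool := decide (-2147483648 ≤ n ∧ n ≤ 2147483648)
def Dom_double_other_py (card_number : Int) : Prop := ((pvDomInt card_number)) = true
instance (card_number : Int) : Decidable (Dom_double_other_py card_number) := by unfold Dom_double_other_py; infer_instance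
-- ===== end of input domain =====

-- B replaces A's backward index-stepping loop by a structural two-at-a-time recursion over the
-- reversed digit list (objective: alternative decomposition, same O(n) cost).

-- ===== PORT A =====
-- card_array = [int(char) for char in str(card_number)]; on Pre_ (0 ≤ card_number) every char is a
-- digit so int(char) succeeds; the `.getD 0` arm is Python's ValueError (negative sign), excluded by Pre_.
def pvDigitsA (card_number : Int) : List Int :=
  (PySem.Int.toChars card_number).map (fun ch => (PySem.Int.ofChars? [ch]).getD 0)

-- A's for-loop over range(len-2, -1, -2) plus the trailing odd-length append.
-- card_array[i] and card_array[i+1]: every index the loop produces is in range, so the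
-- pyGetD default 0 is never consulted (Python's IndexError is unreachable here).
def pvLoopA (card_array : List Int) : List Int :=
  let n : Int := (card_array.length : Int)
  let doubled_array :=
    (PySem.List.pyRange (n - 2) (-1) (-2)).foldl
      (fun acc i =>
        let doubled_digit := PySem.List.pyGetD card_array i 0 * 2
        let doubled_digit := if doubled_digit > 9 then doubled_digit - 9 else doubled_digit
        (acc ++ [doubled_digit]) ++
          [if i + 1 < n then PySem.List.pyGetD card_array (i + 1) 0 else 0]) []
  if PySem.Int.mod n 2 ≠ 0 then doubled_array ++ [PySem.List.pyGetD card_array 0 0]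
  else doubled_array

def double_other_py (card_number : Int) : List Int :=
  pvLoopA (pvDigitsA card_number)

-- ===== PORT B =====
-- digits = [int(char) for char in str(card_number)]  (same first line as A; same ValueError remark)
def pvDigitsB (card_number : Int) : List Int :=
  (PySem.Int.toChars card_number).map (fun ch => (PySem.Int.ofChars? [ch]).getD 0)

-- go(rev): consume the reversed digits two at a time
def pvGoB : List Int → List Int
  | first :: second :: rest =>
    let doubled := second * 2
    let doubled := if doubled > 9 then doubled - 9 else doubled
    [doubled, first] ++ pvGoB rest
  | rev => rev

def double_other_py_alt (card_number : Int) : List Int :=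
  pvGoB ((PySem.List.slice? (pvDigitsB card_number) none none (-1)).getD [])

-- ===== PRECONDITION & SPEC =====
-- Pre_ excludes negative card numbers: there str(card_number) starts with '-' and int('-')
-- raises ValueError in both A and B.
def Pre_double_other_py (card_number : Int) : Prop := 0 ≤ card_number
instance (card_number : Int) : Decidable (Pre_double_other_py card_number) := by
  unfold Pre_double_other_py; infer_instance

def pvWitness_double_other_py : Int := (1234)

def Spec_double_other_py (card_number : Int) (out : List Int) : Prop := out = double_other_py_alt card_number
instance (card_number : Int) (out : List Int) : Decidable (Spec_double_other_py card_number out) := by unfold Spec_double_other_py; infer_instance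

-- ===== CLAIM (what is proved, stated in full; the proofs are below) =====
def Claim_equal_double_other_py : Prop := ∀ (card_number : Int), Dom_double_other_py card_number → Pre_double_other_py card_number → Spec_double_other_py card_number (double_other_py card_number)

-- ===== LEMMAS AND PROOFS =====

-- range(a, -1, -2)-style countdown ranges: nil, cons and membership bounds (step -2 has no PySem book lemma)
lemma pvRangeN2_nil {a b : Int} (h : a ≤ b) : PySem.List.pyRange a b (-2) = [] := by
  unfold PySem.List.pyRange
  have h2 : ¬ b < a := by omega
  norm_num [h2]

lemma pvRangeN2_cons {a b : Int} (h : b < a) :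
    PySem.List.pyRange a b (-2) = a :: PySem.List.pyRange (a - 2) b (-2) := by
  unfold PySem.List.pyRange
  norm_num [h]
  by_cases h2 : b < a - 2
  · rw [if_pos h2]
    have hc : ((a - b + 2 - 1) / 2).toNat = ((a - 2 - b + 2 - 1) / 2).toNat + 1 := by omega
    rw [hc, List.range_succ_eq_map, List.map_cons, List.map_map]
    congr 1
    · norm_num
    · exact List.map_congr_left fun k _ => by
        simp only [Function.comp_apply, Nat.succ_eq_add_one]
        push_cast
        ring
  · rw [if_neg h2]
    have hc : ((a - b + 2 - 1) / 2).toNat = 1 := by omega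
    rw [hc]
    norm_num

lemma pvMemRangeN2 {a b x : Int} (hx : x ∈ PySem.List.pyRange a b (-2)) : b < x ∧ x ≤ a := by
  unfold PySem.List.pyRange at hx
  norm_num at hx
  by_cases h : b < a
  · rw [if_pos h] at hx
    obtain ⟨k, hk, rfl⟩ := hx
    constructor <;> omega
  · rw [if_neg h] at hx
    simp at hx

-- A's loop as a flatMap of [doubled, kept] pairs followed by the odd-length tail
lemma pvLoopA_flat (l : List Int) :
    pvLoopA l =
      (PySem.List.pyRange ((l.length : Int) - 2) (-1) (-2)).flatMap
        (fun i =>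
          [(if PySem.List.pyGetD l i 0 * 2 > 9 then PySem.List.pyGetD l i 0 * 2 - 9
            else PySem.List.pyGetD l i 0 * 2),
           if i + 1 < (l.length : Int) then PySem.List.pyGetD l (i + 1) 0 else 0])
      ++ (if PySem.Int.mod (l.length : Int) 2 ≠ 0 then [PySem.List.pyGetD l 0 0] else []) := by
  unfold pvLoopA
  simp only [List.append_assoc, List.singleton_append]
  rw [PySem.List.foldl_append_eq_flatMap
        (fun i =>
          [(if PySem.List.pyGetD l i 0 * 2 > 9 then PySem.List.pyGetD l i 0 * 2 - 9
            else PySem.List.pyGetD l i 0 * 2),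
           if i + 1 < (l.length : Int) then PySem.List.pyGetD l (i + 1) 0 else 0])]
  split_ifs
  · rfl
  · simp

-- indexing the appended pair from the left part
lemma pvGetD_append_left {l t : List Int} {i : Int} (h0 : 0 ≤ i) (h1 : i < (l.length : Int)) :
    PySem.List.pyGetD (l ++ t) i 0 = PySem.List.pyGetD l i 0 := by
  rw [PySem.List.pyGetD_eq_getElem _ _ h0 (by simp; omega),
      PySem.List.pyGetD_eq_getElem _ _ h0 h1,
      List.getElem_append_left (by omega)]

-- the heart: A's loop over the digit list equals B's recursion over the reversed digit list
lemma pvLoop_eq_go : ∀ (n : Nat) (r : List Int), r.length ≤ n → pvLoopA r.reverse = pvGoB r := by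
  intro n
  induction n with
  | zero =>
    intro r hr
    have hre : r = [] := List.eq_nil_of_length_eq_zero (Nat.le_zero.1 hr)
    subst hre
    rw [List.reverse_nil, pvLoopA_flat]
    rw [pvRangeN2_nil (by norm_num)]
    simp [pvGoB]
  | succ n ih =>
    intro r hr
    match r with
    | [] =>
      rw [List.reverse_nil, pvLoopA_flat]
      rw [pvRangeN2_nil (by norm_num)]
      simp [pvGoB]
    | [a] =>
      rw [pvLoopA_flat]
      simp only [List.reverse_cons, List.reverse_nil, List.nil_append, List.length_cons,
        List.length_nil]
      rw [pvRangeN2_nil (by norm_num)]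
      rw [if_pos (by decide)]
      rw [PySem.List.pyGetD_eq_getElem (i := 0) [a] 0 (by norm_num) (by norm_num)]
      simp [pvGoB]
    | a :: b :: rest =>
      have hm : rest.length ≤ n := by simp at hr; omega
      have hrev : (a :: b :: rest).reverse = rest.reverse ++ [b, a] := by simp
      have hIH : pvGoB rest = pvLoopA rest.reverse := (ih rest hm).symm
      set m : Nat := rest.length with hmdef
      have hlen : (((rest.reverse ++ [b, a]).length : Nat) : Int) = (m : Int) + 2 := by
        simp [hmdef]
      -- RHS: one step of B
      show pvLoopA (a :: b :: rest).reverse = pvGoB (a :: b :: rest)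
      have hgo : pvGoB (a :: b :: rest)
          = (if b * 2 > 9 then b * 2 - 9 else b * 2) :: a :: pvGoB rest := by
        simp [pvGoB]
      rw [hrev, hgo, hIH, pvLoopA_flat, pvLoopA_flat]
      rw [hlen]
      have hl'len : ((rest.reverse.length : Nat) : Int) = (m : Int) := by simp [hmdef]
      rw [hl'len]
      -- peel the first loop iteration (index m = n-2)
      rw [pvRangeN2_cons (by omega), List.flatMap_cons]
      have e1 : PySem.List.pyGetD (rest.reverse ++ [b, a]) ((m : Int) + 2 - 2) 0 = b := by
        rw [PySem.List.pyGetD_eq_getElem _ _ (by omega) (by simp; omega)]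
        rw [List.getElem_append_right (by simp; omega)]
        simp [hmdef]
      have e2 : PySem.List.pyGetD (rest.reverse ++ [b, a]) ((m : Int) + 2 - 2 + 1) 0 = a := by
        rw [PySem.List.pyGetD_eq_getElem _ _ (by omega) (by simp; omega)]
        rw [List.getElem_append_right (by simp; omega)]
        simp [hmdef]
      rw [e1, e2, if_pos (by omega : (m : Int) + 2 - 2 + 1 < (m : Int) + 2)]
      -- remaining iterations read only the rest.reverse part
      have hstart : (m : Int) + 2 - 2 - 2 = (m : Int) - 2 := by ring
      rw [hstart]
      have hcong :
          (PySem.List.pyRange ((m : Int) - 2) (-1) (-2)).flatMap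
            (fun i =>
              [(if PySem.List.pyGetD (rest.reverse ++ [b, a]) i 0 * 2 > 9 then
                  PySem.List.pyGetD (rest.reverse ++ [b, a]) i 0 * 2 - 9
                else PySem.List.pyGetD (rest.reverse ++ [b, a]) i 0 * 2),
               if i + 1 < (m : Int) + 2 then PySem.List.pyGetD (rest.reverse ++ [b, a]) (i + 1) 0
               else 0])
          = (PySem.List.pyRange ((m : Int) - 2) (-1) (-2)).flatMap
            (fun i =>
              [(if PySem.List.pyGetD rest.reverse i 0 * 2 > 9 then
                  PySem.List.pyGetD rest.reverse i 0 * 2 - 9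
                else PySem.List.pyGetD rest.reverse i 0 * 2),
               if i + 1 < (m : Int) then PySem.List.pyGetD rest.reverse (i + 1) 0 else 0]) := by
        rw [List.flatMap_def, List.flatMap_def, List.map_congr_left]
        intro i hi
        obtain ⟨hi1, hi2⟩ := pvMemRangeN2 hi
        have hb0 : PySem.List.pyGetD (rest.reverse ++ [b, a]) i 0
            = PySem.List.pyGetD rest.reverse i 0 :=
          pvGetD_append_left (by omega) (by rw [hl'len]; omega)
        have hb1 : PySem.List.pyGetD (rest.reverse ++ [b, a]) (i + 1) 0
            = PySem.List.pyGetD rest.reverse (i + 1) 0 :=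
          pvGetD_append_left (by omega) (by rw [hl'len]; omega)
        rw [hb0, hb1, if_pos (by omega : i + 1 < (m : Int) + 2),
            if_pos (by omega : i + 1 < (m : Int))]
      rw [hcong]
      -- the odd-length tails agree
      have hmod : PySem.Int.mod ((m : Int) + 2) 2 = PySem.Int.mod (m : Int) 2 := by
        rw [PySem.Int.mod_eq_emod_of_pos (by norm_num), PySem.Int.mod_eq_emod_of_pos (by norm_num)]
        omega
      rw [hmod]
      by_cases hodd : PySem.Int.mod (m : Int) 2 ≠ 0
      · have hm1 : 1 ≤ (m : Int) := by
          by_contra hc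
          have : (m : Int) = 0 := by omega
          rw [this] at hodd
          exact hodd (by decide)
        have h0 : PySem.List.pyGetD (rest.reverse ++ [b, a]) 0 0
            = PySem.List.pyGetD rest.reverse 0 0 :=
          pvGetD_append_left (by omega) (by rw [hl'len]; omega)
        rw [if_pos hodd, if_pos hodd, h0]
        simp
      · rw [if_neg hodd, if_neg hodd]
        simp

-- ===== VERDICT (by name: the statement is the Claim_ definition above) =====
theorem double_other_py_spec : Claim_equal_double_other_py := by
  intro c _ _
  unfold Spec_double_other_py double_other_py double_other_py_alt pvDigitsA pvDigitsB
  rw [PySem.List.slice?_none_none_neg_one, Option.getD_some]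
  have h := pvLoop_eq_go
    ((PySem.Int.toChars c).map (fun ch => (PySem.Int.ofChars? [ch]).getD 0)).reverse.length
    ((PySem.Int.toChars c).map (fun ch => (PySem.Int.ofChars? [ch]).getD 0)).reverse le_rfl
  rw [List.reverse_reverse] at h
  exact h
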